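-- pv_equiv track=rewrite | github.com/S-A-I-V/CodeForcesProblem | flipside.py | flipping_game
-- ===== SOURCE A (Python) =====
-- def flipping_game(arr):
--     n = len(arr)
--     initial_ones = sum(arr)
--
--     if initial_ones == n:
--         return n - 1
--
--     max_diff = float('-inf')
--     current_sum = 0
--
--     for i in range(n):
--         val = 1 if arr[i] == 0 else -1
--         current_sum += val
--
--         if current_sum > max_diff:
--             max_diff = current_sum
--
--         if current_sum < 0:
--             current_sum = 0
--
--     return initial_ones + max_diff
-- ===== SOURCE B (Python) =====
-- def flipping_game(arr):
--     n = len(arr)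
--     ones = sum(arr)
--     if ones == n:
--         return n - 1
--     prefix = [0]
--     for x in arr:
--         prefix.append(prefix[-1] + (1 if x == 0 else -1))
--     mins = [prefix[0]]
--     for p in prefix[1:-1]:
--         mins.append(min(mins[-1], p))
--     gains = [p - m for p, m in zip(prefix[1:], mins)]
--     return ones + max(gains)
-- ===== Notes on version B (the rewrite author's own statement) =====
-- stated objective: alternative
-- what changed: Replaces A's single-pass Kadane scan (running best/current-sum with reset to zero) by staged passes: build the full prefix-sum list of flip values, build the running-minimum list of prefixes, then take the maximum over end positions j of prefix[j] minus the minimum earlier prefix value.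
import Mathlib
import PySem

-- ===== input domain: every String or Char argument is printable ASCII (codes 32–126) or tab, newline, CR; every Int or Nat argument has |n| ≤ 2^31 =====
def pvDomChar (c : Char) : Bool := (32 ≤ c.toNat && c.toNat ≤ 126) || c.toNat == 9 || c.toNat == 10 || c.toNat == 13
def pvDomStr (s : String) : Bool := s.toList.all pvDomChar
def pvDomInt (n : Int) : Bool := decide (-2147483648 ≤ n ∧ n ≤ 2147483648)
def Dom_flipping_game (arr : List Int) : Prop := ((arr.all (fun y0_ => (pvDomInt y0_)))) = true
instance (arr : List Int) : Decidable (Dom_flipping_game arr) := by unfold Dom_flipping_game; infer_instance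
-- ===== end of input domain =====

-- B replaces A's Kadane scan by a staged prefix-sum formulation (objective:
-- alternative decomposition, not faster).

-- ===== PORT A =====
-- Kadane-style single pass; max_diff = float('-inf') is modelled as `none`
-- (the `none` branch of getD is unreachable: n = 0 forces initial_ones = 0 = n).
def flipping_game (arr : List Int) : Int :=
  let n : Int := arr.length
  let initial_ones : Int := arr.sum
  if initial_ones = n then n - 1
  else
    let st := arr.foldl (fun (s : Option Int × Int) x =>
      let cur := s.2 + (if x = 0 then 1 else -1)
      let md := match s.1 with
        | none => some cur
        | some b => if cur > b then some cur else some b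
      (md, if cur < 0 then 0 else cur)) ((none : Option Int), (0 : Int))
    initial_ones + st.1.getD 0

-- ===== PORT B =====
-- staged passes: build the prefix-sum list of the flip values, then the
-- running-minimum list of its proper prefixes, then the best flip gain is the
-- maximum over end positions of prefix value minus earlier minimum;
-- prefix[1:-1] is drop 1 + dropLast (exact: the bounds are 1 and len-1 here),
-- Python's max on a nonempty list is PySem.List.max? (getD unreachable).
def flipping_game_alt (arr : List Int) : Int :=
  let n : Int := arr.length
  let ones : Int := arr.sum
  if ones = n then n - 1
  else
    let pre := arr.foldl (fun (p : List Int) x =>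
      p ++ [p.getLastD 0 + (if x = 0 then 1 else -1)]) [(0 : Int)]
    let mins := ((pre.drop 1).dropLast).foldl (fun (q : List Int) p =>
      q ++ [min (q.getLastD 0) p]) [pre.getD 0 0]
    let gains := ((pre.drop 1).zip mins).map (fun pm => pm.1 - pm.2)
    ones + (PySem.List.max? gains (fun y => y)).getD 0

-- ===== PRECONDITION & SPEC =====
def Spec_flipping_game (arr : List Int) (out : Int) : Prop := out = flipping_game_alt arr
instance (arr : List Int) (out : Int) : Decidable (Spec_flipping_game arr out) := by unfold Spec_flipping_game; infer_instance

-- ===== CLAIM (what is proved, stated in full; the proofs are below) =====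
def Claim_equal_flipping_game : Prop := ∀ (arr : List Int), Dom_flipping_game arr → Spec_flipping_game arr (flipping_game arr)

-- ===== LEMMAS AND PROOFS =====

-- flip value of an entry
def pvVal (x : Int) : Int := if x = 0 then 1 else -1

-- Python's `best = max(best, v)` on an optional running best
def pvOmax (o : Option Int) (v : Int) : Option Int :=
  match o with
  | none => some v
  | some b => if v > b then some v else some b

-- the stream of Kadane gains: gain at each step, current sum reset at 0
def pvGains (c : Int) : List Int → List Int
  | [] => []
  | x :: t => (c + pvVal x) :: pvGains (max 0 (c + pvVal x)) t

-- suffix of the prefix-sum list after accumulated sum a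
def pvTail (a : Int) : List Int → List Int
  | [] => []
  | x :: t => (a + pvVal x) :: pvTail (a + pvVal x) t

theorem pvOmax_some (b v : Int) : pvOmax (some b) v = some (max b v) := by
  simp only [pvOmax, max_def]; split_ifs <;> simp only [Option.some.injEq] <;> omega

-- A's fold maximises the gain stream
theorem pvA_fold (l : List Int) (b : Option Int) (c : Int) :
    (l.foldl (fun (s : Option Int × Int) x =>
      let cur := s.2 + (if x = 0 then 1 else -1)
      let md := match s.1 with
        | none => some cur
        | some b => if cur > b then some cur else some b
      (md, if cur < 0 then 0 else cur)) (b, c)).1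
    = (pvGains c l).foldl pvOmax b := by
  induction l generalizing b c with
  | nil => rfl
  | cons x t ih =>
    show (t.foldl _ (pvOmax b (c + pvVal x), if c + pvVal x < 0 then 0 else c + pvVal x)).1 = _
    rw [show (if c + pvVal x < 0 then (0 : Int) else c + pvVal x) = max 0 (c + pvVal x) by
      rw [max_def]; split_ifs <;> omega]
    rw [ih]
    rfl

-- B's prefix-list construction, generalised over a nonempty accumulator
theorem pvB_prefix (l acc : List Int) (h : acc ≠ []) :
    l.foldl (fun (p : List Int) x => p ++ [p.getLastD 0 + (if x = 0 then 1 else -1)]) acc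
    = acc ++ pvTail (acc.getLastD 0) l := by
  induction l generalizing acc with
  | nil => simp [pvTail]
  | cons x t ih =>
    have hz : (acc ++ [acc.getLastD 0 + pvVal x]).getLastD 0 = acc.getLastD 0 + pvVal x := by
      rw [List.getLastD_concat]
    show t.foldl _ (acc ++ [acc.getLastD 0 + (if x = 0 then 1 else -1)]) = _
    rw [show (if x = 0 then (1:Int) else -1) = pvVal x from rfl]
    rw [ih (acc ++ [acc.getLastD 0 + pvVal x]) (by simp), hz]
    simp [pvTail]

-- running-minimum scan of a list of prefix values
def pvMins (m : Int) : List Int → List Int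
  | [] => []
  | p :: t => min m p :: pvMins (min m p) t

-- B's mins-list construction, generalised over a nonempty accumulator
theorem pvB_mins (l acc : List Int) (h : acc ≠ []) :
    l.foldl (fun (q : List Int) p => q ++ [min (q.getLastD 0) p]) acc
    = acc ++ pvMins (acc.getLastD 0) l := by
  induction l generalizing acc with
  | nil => simp [pvMins]
  | cons p t ih =>
    have hz : (acc ++ [min (acc.getLastD 0) p]).getLastD 0 = min (acc.getLastD 0) p := by
      rw [List.getLastD_concat]
    show t.foldl _ (acc ++ [min (acc.getLastD 0) p]) = _
    rw [ih (acc ++ [min (acc.getLastD 0) p]) (by simp), hz]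
    simp [pvMins]

-- the gain stream is nonempty on a nonempty list, shaped as head :: rest
theorem pvGains_cons (c x : Int) (t : List Int) :
    pvGains c (x :: t) = (c + pvVal x) :: pvGains (max 0 (c + pvVal x)) t := rfl

-- zipping the prefix list against the running minima yields the Kadane gains
theorem pvZip_gains (l : List Int) (a m : Int) :
    ((pvTail a l).zip (m :: pvMins m ((pvTail a l).dropLast))).map (fun pm => pm.1 - pm.2)
    = pvGains (a - m) l := by
  induction l generalizing a m with
  | nil => rfl
  | cons x t ih =>
    cases t with
    | nil =>
      simp only [pvTail, pvGains, List.dropLast_singleton, pvMins, List.zip_cons_cons,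
        List.zip_nil_left, List.map_cons, List.map_nil]
      congr 1
      ring
    | cons y u =>
      have hc : a + pvVal x - min m (a + pvVal x)
          = max 0 (a - m + pvVal x) := by
        rw [min_def, max_def]; split_ifs <;> omega
      have hd : (pvTail a (x :: y :: u)).dropLast
          = (a + pvVal x) :: (pvTail (a + pvVal x) (y :: u)).dropLast := by
        simp [pvTail]
      rw [hd]
      show ((a + pvVal x) - m) :: _ = pvGains (a - m) (x :: y :: u)
      rw [pvGains_cons]
      congr 1
      · ring
      · have := ih (a + pvVal x) (min m (a + pvVal x))
        rw [hc] at this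
        exact this

-- folding pvOmax from a `some` seed is a plain running max
theorem pvOmax_foldl_some (g : List Int) (b : Int) :
    g.foldl pvOmax (some b) = some (g.foldl max b) := by
  induction g generalizing b with
  | nil => rfl
  | cons v t ih => rw [List.foldl_cons, pvOmax_some, ih, List.foldl_cons]

-- clean instantiation of the zip lemma at a = m = 0
theorem pvZip_gains0 (l : List Int) :
    ((pvTail 0 l).zip ((0 : Int) :: pvMins 0 ((pvTail 0 l).dropLast))).map (fun pm => pm.1 - pm.2)
    = pvGains 0 l := by
  have h := pvZip_gains l 0 0
  rw [show ((0 : Int) - 0) = 0 by norm_num] at h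
  exact h

-- ===== VERDICT (by name: the statement is the Claim_ definition above) =====
theorem flipping_game_spec : Claim_equal_flipping_game := by
  intro arr _
  unfold Spec_flipping_game flipping_game flipping_game_alt
  simp only []
  split_ifs with h
  · rfl
  · -- arr ≠ []
    cases arr with
    | nil => exact absurd rfl h
    | cons x0 t0 =>
      rw [pvA_fold]
      rw [pvB_prefix (x0 :: t0) [0] (by simp)]
      rw [show (([0] : List Int).getLastD 0) = 0 from rfl,
        show ([0] ++ pvTail 0 (x0 :: t0)) = (0 : Int) :: pvTail 0 (x0 :: t0) from rfl,
        show (((0 : Int) :: pvTail 0 (x0 :: t0)).drop 1) = pvTail 0 (x0 :: t0) from rfl,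
        show (((0 : Int) :: pvTail 0 (x0 :: t0)).getD 0 0) = (0 : Int) from rfl]
      rw [pvB_mins ((pvTail 0 (x0 :: t0)).dropLast) [0] (by simp),
        show (([0] : List Int).getLastD 0) = 0 from rfl,
        show ([0] ++ pvMins 0 ((pvTail 0 (x0 :: t0)).dropLast))
          = (0 : Int) :: pvMins 0 ((pvTail 0 (x0 :: t0)).dropLast) from rfl]
      rw [pvZip_gains0]
      rw [pvGains_cons, List.foldl_cons,
        show pvOmax none (0 + pvVal x0) = some (0 + pvVal x0) from rfl,
        pvOmax_foldl_some, PySem.List.max?_id_cons]
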